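-- pv_equiv track=rewrite | github.com/itsbudrey/Notion-x-Canvas | canvas_to_notion_sync.py | find_notion_project_url
-- ===== SOURCE A (Python) =====
-- COURSE_MAPPING = {
--     "HIST 281": "https://www.notion.so/25a399d357138029a22fc5319c5d711e",
--     "CS 124": "https://www.notion.so/25a399d357138052ab2be817336f99b7",
--     "MATH 231": "https://www.notion.so/25a399d3571380a9899bfd0aa5f4d4c6",
--     "ENG 100": "https://www.notion.so/25a399d3571380c1a736d06745eb29af",
--     "ENG 111": "https://www.notion.so/25a399d35713808ba76df0511179d181",
--     "TE 200": "https://www.notion.so/25a399d3571380c5bd2deff44048c237",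
--     "PHYS 100": "https://www.notion.so/25a399d35713801ca04adabfb0e0e57e",
--     "CS 199": "https://www.notion.so/263399d3571380c5bd2deff44048c237",
--     "CS 100": "https://www.notion.so/25a399d357138026a3f0f9b3f05b5454",
--     "CITL": None,  # Skip CITL courses (not a class)
-- }
--
-- def find_notion_project_url(course_code):
--     """Find the Notion project URL for a given course code"""
--     if not course_code:
--         return None
--
--     # Exact match
--     if course_code in COURSE_MAPPING:
--         return COURSE_MAPPING[course_code]
--
--     # Try partial match (e.g., "CS124" -> "CS 124")
--     for key in COURSE_MAPPING:
--         if key.replace(' ', '') == course_code.replace(' ', ''):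
--             return COURSE_MAPPING[key]
--
--     return None
-- ===== SOURCE B (Python) =====
-- COURSE_MAPPING = {
--     "HIST 281": "https://www.notion.so/25a399d357138029a22fc5319c5d711e",
--     "CS 124": "https://www.notion.so/25a399d357138052ab2be817336f99b7",
--     "MATH 231": "https://www.notion.so/25a399d3571380a9899bfd0aa5f4d4c6",
--     "ENG 100": "https://www.notion.so/25a399d3571380c1a736d06745eb29af",
--     "ENG 111": "https://www.notion.so/25a399d35713808ba76df0511179d181",
--     "TE 200": "https://www.notion.so/25a399d3571380c5bd2deff44048c237",
--     "PHYS 100": "https://www.notion.so/25a399d35713801ca04adabfb0e0e57e",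
--     "CS 199": "https://www.notion.so/263399d3571380c5bd2deff44048c237",
--     "CS 100": "https://www.notion.so/25a399d357138026a3f0f9b3f05b5454",
--     "CITL": None,  # Skip CITL courses (not a class)
-- }
--
-- # Index built once: space-stripped key -> URL.  Exact matches are a subset of
-- # normalized matches (stripping spaces is idempotent and keys stay distinct),
-- # so a single lookup replaces A's exact check plus fallback scan.
-- NORMALIZED = {k.replace(' ', ''): v for k, v in COURSE_MAPPING.items()}
--
--
-- def find_notion_project_url(course_code):
--     """Find the Notion project URL for a given course code"""
--     if not course_code:
--         return None
--     return NORMALIZED.get(course_code.replace(' ', ''))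
-- ===== Notes on version B (the rewrite author's own statement) =====
-- stated objective: simpler
-- what changed: A's exact-match check plus fallback linear scan over the keys is replaced by a single lookup in a normalized (space-stripped) index dict built once at module level; the scanning loop disappears.
import Mathlib
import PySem

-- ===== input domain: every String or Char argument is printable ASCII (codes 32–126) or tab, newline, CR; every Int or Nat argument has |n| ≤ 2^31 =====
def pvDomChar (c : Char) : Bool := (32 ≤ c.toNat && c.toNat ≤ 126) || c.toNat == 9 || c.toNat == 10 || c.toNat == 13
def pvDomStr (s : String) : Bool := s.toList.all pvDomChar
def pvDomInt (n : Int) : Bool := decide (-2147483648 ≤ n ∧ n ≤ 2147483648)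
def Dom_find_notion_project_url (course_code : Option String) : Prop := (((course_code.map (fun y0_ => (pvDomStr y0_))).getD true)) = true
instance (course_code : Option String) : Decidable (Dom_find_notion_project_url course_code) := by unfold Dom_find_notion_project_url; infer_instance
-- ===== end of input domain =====

-- B replaces A's exact-match check plus fallback scan over the keys by one lookup
-- in a normalized (space-stripped) index built once (objective: simpler).

-- ===== PORT A =====
-- shared module-level constant COURSE_MAPPING
def courseMapping : PySem.Dict String (Option String) :=
  PySem.Dict.ofList
    [ ("HIST 281", some "https://www.notion.so/25a399d357138029a22fc5319c5d711e")
    , ("CS 124",   some "https://www.notion.so/25a399d357138052ab2be817336f99b7")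
    , ("MATH 231", some "https://www.notion.so/25a399d3571380a9899bfd0aa5f4d4c6")
    , ("ENG 100",  some "https://www.notion.so/25a399d3571380c1a736d06745eb29af")
    , ("ENG 111",  some "https://www.notion.so/25a399d35713808ba76df0511179d181")
    , ("TE 200",   some "https://www.notion.so/25a399d3571380c5bd2deff44048c237")
    , ("PHYS 100", some "https://www.notion.so/25a399d35713801ca04adabfb0e0e57e")
    , ("CS 199",   some "https://www.notion.so/263399d3571380c5bd2deff44048c237")
    , ("CS 100",   some "https://www.notion.so/25a399d357138026a3f0f9b3f05b5454")
    , ("CITL",     none) ]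

-- A's `for key in COURSE_MAPPING:` loop, first key whose space-stripped form matches
def scanKeys (c : String) : List (String × Option String) → Option String
  | [] => none
  | (k, _) :: rest =>
      if PySem.Str.replace k " " "" = PySem.Str.replace c " " ""
      then PySem.Dict.getD courseMapping k none   -- COURSE_MAPPING[key]
      else scanKeys c rest

def find_notion_project_url (course_code : Option String) : Option String :=
  match course_code with
  | none => none                                   -- `if not course_code`
  | some c =>
      if c = "" then none
      else if PySem.Dict.contains courseMapping c  -- exact match
      then PySem.Dict.getD courseMapping c none    -- COURSE_MAPPING[course_code]
      else scanKeys c courseMapping.items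

-- ===== PORT B =====
-- module-level dict comprehension {k.replace(' ',''): v for k, v in COURSE_MAPPING.items()}
def normalizedMapping : PySem.Dict String (Option String) :=
  courseMapping.items.foldl
    (fun d kv => d.insert (PySem.Str.replace kv.1 " " "") kv.2) PySem.Dict.empty

def find_notion_project_url_alt (course_code : Option String) : Option String :=
  match course_code with
  | none => none
  | some c =>
      if c = "" then none
      else PySem.Dict.getD normalizedMapping (PySem.Str.replace c " " "") none

-- ===== PRECONDITION & SPEC =====
def Spec_find_notion_project_url (course_code : Option String) (out : Option String) : Prop := out = find_notion_project_url_alt course_code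
instance (course_code : Option String) (out : Option String) : Decidable (Spec_find_notion_project_url course_code out) := by unfold Spec_find_notion_project_url; infer_instance

-- ===== CLAIM (what is proved, stated in full; the proofs are below) =====
def Claim_equal_find_notion_project_url : Prop := ∀ (course_code : Option String), Dom_find_notion_project_url course_code → Spec_find_notion_project_url course_code (find_notion_project_url course_code)

-- ===== LEMMAS AND PROOFS =====

-- A's scan with course_code normalized up front (same traversal, same first match)
def scanAux (r : String) : List (String × Option String) → Option String
  | [] => none
  | (k, _) :: rest =>
      if PySem.Str.replace k " " "" = r
      then PySem.Dict.getD courseMapping k none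
      else scanAux r rest

lemma scanKeys_eq_scanAux (c : String) (l : List (String × Option String)) :
    scanKeys c l = scanAux (PySem.Str.replace c " " "") l := by
  induction l with
  | nil => rfl
  | cons kv rest ih => cases kv; simp [scanKeys, scanAux, ih]

lemma scanAux_eq_getD (r : String) :
    scanAux r courseMapping.items = PySem.Dict.getD normalizedMapping r none := by
  by_cases h1 : r = "HIST281"; · subst h1; decide
  by_cases h2 : r = "CS124"; · subst h2; decide
  by_cases h3 : r = "MATH231"; · subst h3; decide
  by_cases h4 : r = "ENG100"; · subst h4; decide
  by_cases h5 : r = "ENG111"; · subst h5; decide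
  by_cases h6 : r = "TE200"; · subst h6; decide
  by_cases h7 : r = "PHYS100"; · subst h7; decide
  by_cases h8 : r = "CS199"; · subst h8; decide
  by_cases h9 : r = "CS100"; · subst h9; decide
  by_cases h10 : r = "CITL"; · subst h10; decide
  have e1 : PySem.Str.replace "HIST 281" " " "" = "HIST281" := by decide
  have e2 : PySem.Str.replace "CS 124" " " "" = "CS124" := by decide
  have e3 : PySem.Str.replace "MATH 231" " " "" = "MATH231" := by decide
  have e4 : PySem.Str.replace "ENG 100" " " "" = "ENG100" := by decide
  have e5 : PySem.Str.replace "ENG 111" " " "" = "ENG111" := by decide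
  have e6 : PySem.Str.replace "TE 200" " " "" = "TE200" := by decide
  have e7 : PySem.Str.replace "PHYS 100" " " "" = "PHYS100" := by decide
  have e8 : PySem.Str.replace "CS 199" " " "" = "CS199" := by decide
  have e9 : PySem.Str.replace "CS 100" " " "" = "CS100" := by decide
  have e10 : PySem.Str.replace "CITL" " " "" = "CITL" := by decide
  have hit : courseMapping.items =
      [ ("HIST 281", some "https://www.notion.so/25a399d357138029a22fc5319c5d711e")
      , ("CS 124",   some "https://www.notion.so/25a399d357138052ab2be817336f99b7")
      , ("MATH 231", some "https://www.notion.so/25a399d3571380a9899bfd0aa5f4d4c6")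
      , ("ENG 100",  some "https://www.notion.so/25a399d3571380c1a736d06745eb29af")
      , ("ENG 111",  some "https://www.notion.so/25a399d35713808ba76df0511179d181")
      , ("TE 200",   some "https://www.notion.so/25a399d3571380c5bd2deff44048c237")
      , ("PHYS 100", some "https://www.notion.so/25a399d35713801ca04adabfb0e0e57e")
      , ("CS 199",   some "https://www.notion.so/263399d3571380c5bd2deff44048c237")
      , ("CS 100",   some "https://www.notion.so/25a399d357138026a3f0f9b3f05b5454")
      , ("CITL",     none) ] := by decide
  have b1 : ("HIST281" == r) = false := beq_eq_false_iff_ne.mpr (Ne.symm h1)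
  have b2 : ("CS124" == r) = false := beq_eq_false_iff_ne.mpr (Ne.symm h2)
  have b3 : ("MATH231" == r) = false := beq_eq_false_iff_ne.mpr (Ne.symm h3)
  have b4 : ("ENG100" == r) = false := beq_eq_false_iff_ne.mpr (Ne.symm h4)
  have b5 : ("ENG111" == r) = false := beq_eq_false_iff_ne.mpr (Ne.symm h5)
  have b6 : ("TE200" == r) = false := beq_eq_false_iff_ne.mpr (Ne.symm h6)
  have b7 : ("PHYS100" == r) = false := beq_eq_false_iff_ne.mpr (Ne.symm h7)
  have b8 : ("CS199" == r) = false := beq_eq_false_iff_ne.mpr (Ne.symm h8)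
  have b9 : ("CS100" == r) = false := beq_eq_false_iff_ne.mpr (Ne.symm h9)
  have b10 : ("CITL" == r) = false := beq_eq_false_iff_ne.mpr (Ne.symm h10)
  rw [hit]
  simp [scanAux, e1, e2, e3, e4, e5, e6, e7, e8, e9, e10,
    normalizedMapping, hit, PySem.Dict.getD, PySem.Dict.get?, PySem.Dict.empty, PySem.Dict.insert,
    List.find?, b1, b2, b3, b4, b5, b6, b7, b8, b9, b10, Ne.symm h1, Ne.symm h2, Ne.symm h3,
    Ne.symm h4, Ne.symm h5, Ne.symm h6, Ne.symm h7, Ne.symm h8, Ne.symm h9, Ne.symm h10]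

lemma contains_false (c : String)
    (h1 : c ≠ "HIST 281") (h2 : c ≠ "CS 124") (h3 : c ≠ "MATH 231") (h4 : c ≠ "ENG 100")
    (h5 : c ≠ "ENG 111") (h6 : c ≠ "TE 200") (h7 : c ≠ "PHYS 100") (h8 : c ≠ "CS 199")
    (h9 : c ≠ "CS 100") (h10 : c ≠ "CITL") :
    PySem.Dict.contains courseMapping c = false := by
  have hk : courseMapping.keys =
      ["HIST 281", "CS 124", "MATH 231", "ENG 100", "ENG 111", "TE 200", "PHYS 100",
       "CS 199", "CS 100", "CITL"] := by decide
  rw [PySem.Dict.contains_eq_decide_mem_keys, hk]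
  simp [h1, h2, h3, h4, h5, h6, h7, h8, h9, h10]

-- ===== VERDICT (by name: the statement is the Claim_ definition above) =====
theorem find_notion_project_url_spec : Claim_equal_find_notion_project_url := by
  intro cc _
  unfold Spec_find_notion_project_url
  cases cc with
  | none => rfl
  | some c =>
    by_cases hc : c = ""
    · simp [find_notion_project_url, find_notion_project_url_alt, hc]
    by_cases h1 : c = "HIST 281"; · subst h1; decide
    by_cases h2 : c = "CS 124"; · subst h2; decide
    by_cases h3 : c = "MATH 231"; · subst h3; decide
    by_cases h4 : c = "ENG 100"; · subst h4; decide
    by_cases h5 : c = "ENG 111"; · subst h5; decide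
    by_cases h6 : c = "TE 200"; · subst h6; decide
    by_cases h7 : c = "PHYS 100"; · subst h7; decide
    by_cases h8 : c = "CS 199"; · subst h8; decide
    by_cases h9 : c = "CS 100"; · subst h9; decide
    by_cases h10 : c = "CITL"; · subst h10; decide
    simp [find_notion_project_url, find_notion_project_url_alt, hc,
      contains_false c h1 h2 h3 h4 h5 h6 h7 h8 h9 h10,
      scanKeys_eq_scanAux, scanAux_eq_getD]
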